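-- pv_equiv track=rewrite | github.com/sjsawyer/aoc-2021 | q07/q07.py | part1
-- ===== SOURCE A (Python) =====
-- def part1(data):
--
--     counts = {d: 0 for d in data}
--     for d in data:
--         counts[d] += 1
--
--     elements = counts.keys()
--
--     cost = {d: 0 for d in elements}
--     for d in elements:
--         for other in elements:
--             cost[d] += abs(d - other) * counts[other]
--
--     return min(cost.values())
-- ===== SOURCE B (Python) =====
-- def part1(data):
--     # sort once, then sweep left-to-right updating the total distance incrementally
--     ys = sorted(data)
--     n = len(ys)
--     prev = ys[0]
--     cost = sum(v - prev for v in ys)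
--     best = cost
--     below = 1
--     for y in ys[1:]:
--         step = y - prev
--         cost += step * below - step * (n - below)
--         best = min(best, cost)
--         prev = y
--         below += 1
--     return best
-- ===== Notes on version B (the rewrite author's own statement) =====
-- stated objective: faster
-- what changed: A builds a counts dict and an all-pairs cost table over the distinct positions; B sorts once and sweeps left-to-right, updating the total weighted distance in O(1) per step while tracking the minimum.
import Mathlib
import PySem

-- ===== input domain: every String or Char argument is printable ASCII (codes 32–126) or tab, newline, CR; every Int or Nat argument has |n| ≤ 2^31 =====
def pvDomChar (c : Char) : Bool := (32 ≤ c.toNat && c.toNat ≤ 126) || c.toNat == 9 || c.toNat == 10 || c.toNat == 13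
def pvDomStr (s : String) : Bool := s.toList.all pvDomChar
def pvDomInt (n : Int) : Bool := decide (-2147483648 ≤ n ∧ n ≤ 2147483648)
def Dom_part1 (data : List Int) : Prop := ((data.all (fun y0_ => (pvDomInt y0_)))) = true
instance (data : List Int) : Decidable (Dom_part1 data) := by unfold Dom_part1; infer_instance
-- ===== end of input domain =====

-- B replaces A's all-pairs cost table over distinct positions by one sort and a single
-- incremental sweep that updates the total distance in O(1) per step (O(n log n) vs O(m^2)).

-- ===== PORT A =====
def part1 (data : List Int) : Int :=
  -- counts = {d: 0 for d in data}; for d in data: counts[d] += 1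
  let counts0 : PySem.Dict Int Int := data.foldl (fun c d => c.insert d 0) PySem.Dict.empty
  let counts : PySem.Dict Int Int := data.foldl (fun c d => c.modify d 0 (· + 1)) counts0
  let elements := counts.keys
  -- cost = {d: 0 for d in elements}; nested loop accumulating abs(d - other) * counts[other]
  let cost0 : PySem.Dict Int Int := elements.foldl (fun c d => c.insert d 0) PySem.Dict.empty
  let cost : PySem.Dict Int Int := elements.foldl (fun c d =>
      elements.foldl (fun c other =>
        c.modify d 0 (fun x => x + |d - other| * counts.getD other 0)) c) cost0
  -- min(cost.values())  (raises on empty data: excluded by Pre_part1)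
  (PySem.List.min? cost.values (fun x => x)).getD 0

-- ===== PORT B =====
def part1_alt (data : List Int) : Int :=
  let ys := PySem.List.sorted data (fun x => x) false
  let n : Int := ys.length
  let prev0 := PySem.List.pyGetD ys 0 0       -- ys[0] (raises on empty data: excluded by Pre_part1)
  let cost0 := (ys.map (fun v => v - prev0)).sum
  let r := (PySem.List.slice ys (some 1) none).foldl
    (fun (st : Int × Int × Int × Int) y =>
      let prev := st.1
      let cost := st.2.1
      let best := st.2.2.1
      let below := st.2.2.2
      let step := y - prev
      let cost' := cost + step * below - step * (n - below)
      (y, cost', min best cost', below + 1)) (prev0, cost0, cost0, 1)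
  r.2.2.1

-- ===== PRECONDITION & SPEC =====
-- A raises ValueError (min of an empty sequence) on the empty list; B raises IndexError there too.
def Pre_part1 (data : List Int) : Prop := data ≠ []
instance (data : List Int) : Decidable (Pre_part1 data) := by unfold Pre_part1; infer_instance
def pvWitness_part1 : List Int := [16, 1, 2, 0, 4, 2, 7, 1, 2, 14]

def Spec_part1 (data : List Int) (out : Int) : Prop := out = part1_alt data
instance (data : List Int) (out : Int) : Decidable (Spec_part1 data out) := by unfold Spec_part1; infer_instance

-- ===== CLAIM (what is proved, stated in full; the proofs are below) =====
def Claim_equal_part1 : Prop := ∀ (data : List Int), Dom_part1 data → Pre_part1 data → Spec_part1 data (part1 data)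

-- ===== LEMMAS AND PROOFS =====

-- f x = sum of |x - v| over the list
def pvAbsSum (xs : List Int) (x : Int) : Int := (xs.map (fun v => |x - v|)).sum

-- the dict initialised with zeros answers 0 everywhere
theorem getD_insertZeros (l : List Int) (c : PySem.Dict Int Int) (k : Int)
    (h : c.getD k 0 = 0) : (l.foldl (fun c d => c.insert d 0) c).getD k 0 = 0 := by
  induction l generalizing c with
  | nil => simpa using h
  | cons d t ih =>
      simp only [List.foldl_cons]
      exact ih _ (by rw [PySem.Dict.getD_insert]; split <;> simp [h])

-- inner loop: adds Σ g to key d, leaves the rest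
theorem innerFold_getD (l : List Int) (d k : Int) (g : Int → Int) (c : PySem.Dict Int Int) :
    (l.foldl (fun c o => c.modify d 0 (fun x => x + g o)) c).getD k 0
      = c.getD k 0 + (if k = d then (l.map g).sum else 0) := by
  induction l generalizing c with
  | nil => simp
  | cons o t ih =>
      simp only [List.foldl_cons, List.map_cons, List.sum_cons]
      rw [ih, PySem.Dict.getD_modify]
      by_cases hk : k = d
      · subst hk
        simp
        omega
      · simp only [if_neg hk]

theorem innerFold_keys (l : List Int) (d : Int) (g : Int → Int) (c : PySem.Dict Int Int)
    (h : d ∈ c.keys) :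
    (l.foldl (fun c o => c.modify d 0 (fun x => x + g o)) c).keys = c.keys := by
  induction l generalizing c with
  | nil => rfl
  | cons o t ih =>
      have hm : (c.modify d 0 (fun x => x + g o)).keys = c.keys := by
        rw [PySem.Dict.keys_modify, PySem.Dict.keys_insert_of_contains]
        exact (PySem.Dict.contains_iff_mem_keys _ _).2 h
      simp only [List.foldl_cons]
      rw [ih _ (by rw [hm]; exact h), hm]

-- outer loop getD: each key of the (nodup) outer list receives its full cost once
theorem outerFold_getD (l : List Int) (el : List Int) (w : Int → Int) (k : Int)
    (c : PySem.Dict Int Int) (hnd : l.Nodup) :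
    (l.foldl (fun c d => el.foldl (fun c o => c.modify d 0 (fun x => x + |d - o| * w o)) c) c).getD k 0
      = c.getD k 0 + (if k ∈ l then (el.map (fun o => |k - o| * w o)).sum else 0) := by
  induction l generalizing c with
  | nil => simp
  | cons d t ih =>
      simp only [List.foldl_cons]
      rw [ih _ (List.nodup_cons.1 hnd).2, innerFold_getD]
      by_cases hk : k = d
      · subst hk
        simp [(List.nodup_cons.1 hnd).1]
      · simp [hk, List.mem_cons]

theorem outerFold_keys (l : List Int) (el : List Int) (w : Int → Int)
    (c : PySem.Dict Int Int) (hsub : ∀ d ∈ l, d ∈ c.keys) :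
    (l.foldl (fun c d => el.foldl (fun c o => c.modify d 0 (fun x => x + |d - o| * w o)) c) c).keys = c.keys := by
  induction l generalizing c with
  | nil => rfl
  | cons d t ih =>
      simp only [List.foldl_cons]
      rw [ih, innerFold_keys]
      · exact hsub d (by simp)
      · intro x hx
        rw [innerFold_keys _ _ _ _ (hsub d (by simp))]
        exact hsub x (by simp [hx])

-- Σ over a covering nodup list weighted by multiplicity = Σ over the raw list
theorem sum_if_eq (S : List Int) (g : Int → Int) (v : Int) (hnd : S.Nodup) (hv : v ∈ S) :
    (S.map (fun o => if o = v then g o else 0)).sum = g v := by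
  induction S with
  | nil => simp at hv
  | cons o t ih =>
      simp only [List.map_cons, List.sum_cons]
      rcases List.mem_cons.1 hv with h | h
      · subst h
        have : (t.map (fun o => if o = v then g o else 0)).sum = 0 := by
          apply List.sum_eq_zero
          intro x hx
          rcases List.mem_map.1 hx with ⟨o, ho, rfl⟩
          have : o ≠ v := fun e => (List.nodup_cons.1 hnd).1 (e ▸ ho)
          simp [this]
        simp [this]
      · have hov : o ≠ v := fun e => (List.nodup_cons.1 hnd).1 (e ▸ h)
        rw [ih (List.nodup_cons.1 hnd).2 h]
        simp [hov]

theorem sum_weighted (xs S : List Int) (g : Int → Int) (hnd : S.Nodup)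
    (hsub : ∀ v ∈ xs, v ∈ S) :
    (S.map (fun o => g o * (xs.count o : Int))).sum = (xs.map g).sum := by
  induction xs with
  | nil => simp
  | cons v t ih =>
      have step : (S.map (fun o => g o * ((v :: t).count o : Int))).sum
          = (S.map (fun o => g o * (t.count o : Int))).sum
            + (S.map (fun o => if o = v then g o else 0)).sum := by
        rw [← List.sum_map_add]
        refine congrArg List.sum (List.map_congr_left ?_)
        intro o _
        by_cases h : o = v
        · subst h
          simp
          ring
        · have h2 : ¬ v = o := fun e => h e.symm
          simp [h, h2]
      rw [step, ih (fun x hx => hsub x (by simp [hx])),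
          sum_if_eq S g v hnd (hsub v (by simp))]
      simp only [List.map_cons, List.sum_cons]
      omega

-- closed form of the abs-sum at a split point
theorem sum_map_sub_left (a : List Int) (x : Int) :
    (a.map (fun v => x - v)).sum = x * a.length - a.sum := by
  induction a with
  | nil => simp
  | cons h t ih => simp [ih]; ring

theorem sum_map_sub_right (b : List Int) (x : Int) :
    (b.map (fun v => v - x)).sum = b.sum - x * b.length := by
  induction b with
  | nil => simp
  | cons h t ih => simp [ih]; ring

theorem absSum_split (a b : List Int) (x : Int)
    (ha : ∀ v ∈ a, v ≤ x) (hb : ∀ v ∈ b, x ≤ v) :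
    pvAbsSum (a ++ b) x = (x * a.length - a.sum) + (b.sum - x * b.length) := by
  unfold pvAbsSum
  rw [List.map_append, List.sum_append]
  have h1 : (a.map (fun v => |x - v|)).sum = x * a.length - a.sum := by
    rw [List.map_congr_left (fun v hv => abs_of_nonneg (by have := ha v hv; omega))]
    exact sum_map_sub_left a x
  have h2 : (b.map (fun v => |x - v|)).sum = b.sum - x * b.length := by
    have hmap : b.map (fun v => |x - v|) = b.map (fun v => v - x) :=
      List.map_congr_left (fun v hv => by
        have := hb v hv
        rw [abs_of_nonpos (by omega : x - v ≤ 0)]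
        ring)
    rw [hmap]
    exact sum_map_sub_right b x
  rw [h1, h2]

-- incremental step: moving the query point to the next sorted element
theorem absSum_step (l t : List Int) (prev y : Int)
    (hp : (l ++ prev :: y :: t).Pairwise (· ≤ ·)) :
    pvAbsSum (l ++ prev :: y :: t) y
      = pvAbsSum (l ++ prev :: y :: t) prev
        + (y - prev) * ((l.length : Int) + 1)
        - (y - prev) * (((l ++ prev :: y :: t).length : Int) - ((l.length : Int) + 1)) := by
  have hre : l ++ prev :: y :: t = (l ++ [prev]) ++ (y :: t) := by simp
  have hpair := hp
  rw [hre] at hpair ⊢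
  rw [List.pairwise_append] at hpair
  obtain ⟨hL, hR, hcross⟩ := hpair
  have hprevL : ∀ v ∈ l ++ [prev], v ≤ prev := by
    intro v hv
    rcases List.mem_append.1 hv with h | h
    · rw [List.pairwise_append] at hL
      exact hL.2.2 v h prev (by simp)
    · simp at h; omega
  have hyR : ∀ v ∈ y :: t, y ≤ v := by
    intro v hv
    rcases List.mem_cons.1 hv with h | h
    · omega
    · exact (List.pairwise_cons.1 hR).1 v h
  have hprevy : prev ≤ y := hcross prev (by simp) y (by simp)
  have e1 := absSum_split (l ++ [prev]) (y :: t) y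
    (fun v hv => le_trans (hprevL v hv) hprevy) hyR
  have e2 := absSum_split (l ++ [prev]) (y :: t) prev
    hprevL (fun v hv => le_trans hprevy (hyR v hv))
  rw [e1, e2]
  simp only [List.length_append, List.length_cons, List.length_nil]
  push_cast
  ring

-- the sweep invariant: starting at the true cost of `prev`, the fold tracks
-- min of the true costs of the remaining elements
theorem loopInv (ys : List Int) (hp : ys.Pairwise (· ≤ ·)) :
    ∀ (t l : List Int) (prev best : Int), ys = l ++ prev :: t →
    (t.foldl
      (fun (st : Int × Int × Int × Int) y =>
        (y, st.2.1 + (y - st.1) * st.2.2.2 - (y - st.1) * ((ys.length : Int) - st.2.2.2),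
         min st.2.2.1 (st.2.1 + (y - st.1) * st.2.2.2 - (y - st.1) * ((ys.length : Int) - st.2.2.2)),
         st.2.2.2 + 1))
      (prev, pvAbsSum ys prev, best, (l.length : Int) + 1)).2.2.1
      = (t.map (pvAbsSum ys)).foldl min best := by
  intro t
  induction t with
  | nil => intro l prev best _; rfl
  | cons y t' ih =>
      intro l prev best heq
      subst heq
      simp only [List.foldl_cons, List.map_cons]
      have hstep : pvAbsSum (l ++ prev :: y :: t') prev
          + (y - prev) * ((l.length : Int) + 1)
          - (y - prev) * (((l ++ prev :: y :: t').length : Int) - ((l.length : Int) + 1))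
          = pvAbsSum (l ++ prev :: y :: t') y := (absSum_step l t' prev y hp).symm
      rw [hstep]
      have hlen : ((l.length : Int) + 1) + 1 = (((l ++ [prev]).length : Int) + 1) := by
        push_cast [List.length_append, List.length_cons, List.length_nil]
        ring
      rw [hlen]
      exact ih (l ++ [prev]) y (min best (pvAbsSum (l ++ prev :: y :: t') y)) (by simp)


theorem loopInv0 (ys : List Int) (hp : ys.Pairwise (fun a b => a ≤ b)) (y0 : Int) (tail : List Int)
    (h : ys = y0 :: tail) (best : Int) :
    (tail.foldl
      (fun (st : Int × Int × Int × Int) y =>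
        (y, st.2.1 + (y - st.1) * st.2.2.2 - (y - st.1) * ((ys.length : Int) - st.2.2.2),
         min st.2.2.1 (st.2.1 + (y - st.1) * st.2.2.2 - (y - st.1) * ((ys.length : Int) - st.2.2.2)),
         st.2.2.2 + 1))
      (y0, pvAbsSum ys y0, best, 1)).2.2.1
      = (tail.map (fun k => pvAbsSum ys k)).foldl min best := by
  have := loopInv ys hp tail [] y0 best (by simpa using h)
  simpa using this

theorem set_update_self (xs : List Int) :
    PySem.Set.update (PySem.Set.ofList xs) xs = PySem.Set.ofList xs := by
  rw [PySem.Set.update_eq_append_filter]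
  have hnil : List.filter (fun y => !(PySem.Set.ofList xs).contains y) (PySem.Set.ofList xs) = [] := by
    rw [List.filter_eq_nil_iff]
    intro a ha
    simpa [PySem.Set.contains_iff] using ha
  rw [hnil, List.append_nil]

-- the whole cost table of A, as a list of per-key sums
theorem costValues (el : List Int) (w : Int → Int) (hnd : el.Nodup) :
    (List.foldl (fun c d => List.foldl (fun c o => PySem.Dict.modify c d 0 (fun x => x + |d - o| * w o)) c el)
        (List.foldl (fun (c : PySem.Dict Int Int) d => c.insert d 0) PySem.Dict.empty el) el).values
      = el.map (fun k => (el.map (fun o => |k - o| * w o)).sum) := by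
  set cost0 := List.foldl (fun (c : PySem.Dict Int Int) d => c.insert d 0) PySem.Dict.empty el with h0
  have hck0 : cost0.keys = el := by
    have := PySem.Dict.keys_foldl_insert el (fun _ _ => (0 : Int)) PySem.Dict.empty
    simpa [PySem.Dict.keys_empty, PySem.Set.update_nil_left,
           PySem.Set.ofList_eq_self_of_nodup el hnd] using this
  have hkeys : (List.foldl (fun c d => List.foldl (fun c o => PySem.Dict.modify c d 0 (fun x => x + |d - o| * w o)) c el) cost0 el).keys = el := by
    rw [outerFold_keys el el w cost0 (fun d hd => by rw [hck0]; exact hd)]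
    exact hck0
  have hgd : ∀ k ∈ el,
      (List.foldl (fun c d => List.foldl (fun c o => PySem.Dict.modify c d 0 (fun x => x + |d - o| * w o)) c el) cost0 el).getD k 0
        = (el.map (fun o => |k - o| * w o)).sum := by
    intro k hk
    rw [outerFold_getD el el w k cost0 hnd, h0,
        getD_insertZeros el PySem.Dict.empty k (PySem.Dict.getD_empty k 0)]
    simp [hk]
  rw [PySem.Dict.values_eq_map_keys _ (by rw [hkeys]; exact hnd) 0, hkeys]
  exact List.map_congr_left hgd

-- A computes the min of the abs-sum over the distinct values of data
theorem partA_char (data : List Int) :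
    part1 data
      = (PySem.List.min? ((PySem.Set.ofList data).map (fun k => pvAbsSum data k)) (fun x => x)).getD 0 := by
  simp only [part1]
  have hk0 : (List.foldl (fun (c : PySem.Dict Int Int) d => c.insert d 0) PySem.Dict.empty data).keys
      = PySem.Set.ofList data := by
    have := PySem.Dict.keys_foldl_insert data (fun _ _ => (0 : Int)) PySem.Dict.empty
    simpa [PySem.Dict.keys_empty, PySem.Set.update_nil_left] using this
  have hkc : (List.foldl (fun (c : PySem.Dict Int Int) d => c.modify d 0 (· + 1))
        (List.foldl (fun (c : PySem.Dict Int Int) d => c.insert d 0) PySem.Dict.empty data) data).keys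
      = PySem.Set.ofList data := by
    have h1 := PySem.Dict.keys_foldl_modify data (0 : Int) (fun _ _ v => v + 1)
      (List.foldl (fun (c : PySem.Dict Int Int) d => c.insert d 0) PySem.Dict.empty data)
    rw [hk0] at h1
    rw [set_update_self] at h1
    exact h1
  have hcv : ∀ o : Int,
      (List.foldl (fun (c : PySem.Dict Int Int) d => c.modify d 0 (· + 1))
        (List.foldl (fun (c : PySem.Dict Int Int) d => c.insert d 0) PySem.Dict.empty data) data).getD o 0
      = (List.count o data : Int) := by
    intro o
    have h := PySem.Dict.getD_foldl_modify_add_one data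
      (List.foldl (fun (c : PySem.Dict Int Int) d => c.insert d 0) PySem.Dict.empty data) o
    rw [getD_insertZeros data PySem.Dict.empty o (PySem.Dict.getD_empty o 0)] at h
    simpa using h
  rw [hkc]
  simp only [hcv]
  rw [costValues (PySem.Set.ofList data) (fun o => (List.count o data : Int)) (PySem.Set.nodup_ofList data)]
  have hmap : (PySem.Set.ofList data).map (fun k => ((PySem.Set.ofList data).map (fun o => |k - o| * (List.count o data : Int))).sum)
      = (PySem.Set.ofList data).map (fun k => pvAbsSum data k) := by
    refine List.map_congr_left fun k _ => ?_
    unfold pvAbsSum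
    exact sum_weighted data (PySem.Set.ofList data) (fun o => |k - o|)
      (PySem.Set.nodup_ofList data) (fun v hv => (PySem.Set.mem_ofList data v).2 hv)
  rw [hmap]

-- B computes the min of the abs-sum over the sorted list
theorem partB_char (data : List Int) (hne : data ≠ []) :
    PySem.List.min?
      ((PySem.List.sorted data (fun x => x) false).map
        (fun k => pvAbsSum (PySem.List.sorted data (fun x => x) false) k))
      (fun x => x) = some (part1_alt data) := by
  obtain ⟨y0, tail, hcons⟩ : ∃ a l, PySem.List.sorted data (fun x => x) false = a :: l := by
    cases h : PySem.List.sorted data (fun x => x) false with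
    | nil => exact absurd ((PySem.List.sorted_eq_nil_iff data _ false).1 h) hne
    | cons a l => exact ⟨a, l, rfl⟩
  have hp : (y0 :: tail).Pairwise (fun a b => a ≤ b) := by
    have := PySem.List.sorted_pairwise data (fun x => x)
    exact hcons ▸ this
  have hle : ∀ v ∈ y0 :: tail, y0 ≤ v := by
    intro v hv
    rcases List.mem_cons.1 hv with rfl | h
    · exact le_refl _
    · exact (List.pairwise_cons.1 hp).1 v h
  simp only [part1_alt]
  rw [hcons, PySem.List.pyGetD_zero_cons, PySem.List.slice_from_one]
  simp only [List.tail_cons]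
  have hc0 : ((y0 :: tail).map (fun v => v - y0)).sum = pvAbsSum (y0 :: tail) y0 := by
    unfold pvAbsSum
    refine (congrArg List.sum (List.map_congr_left fun v hv => ?_)).symm
    rw [abs_of_nonpos (by have := hle v hv; omega : y0 - v ≤ 0)]
    ring
  rw [hc0]
  rw [loopInv0 (y0 :: tail) hp y0 tail rfl (pvAbsSum (y0 :: tail) y0)]
  rw [List.map_cons, PySem.List.min?_id_cons]

-- ===== main proof =====
theorem part1_spec : Claim_equal_part1 := by
  intro data _ hne
  unfold Spec_part1
  rw [partA_char]
  have hB := partB_char data hne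
  have hperm : ∀ k : Int, pvAbsSum (PySem.List.sorted data (fun x => x) false) k = pvAbsSum data k := by
    intro k
    exact List.Perm.sum_eq (List.Perm.map _ (PySem.List.sorted_perm data (fun x => x) false))
  obtain ⟨d0, hd0⟩ := List.exists_mem_of_ne_nil data hne
  cases hA : PySem.List.min? ((PySem.Set.ofList data).map (fun k => pvAbsSum data k)) (fun x => x) with
  | none =>
      rw [PySem.List.min?_eq_none_iff] at hA
      have hmem : pvAbsSum data d0 ∈ (PySem.Set.ofList data).map (fun k => pvAbsSum data k) :=
        List.mem_map_of_mem ((PySem.Set.mem_ofList data d0).2 hd0)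
      rw [hA] at hmem
      simp at hmem
  | some a =>
      simp only [Option.getD_some]
      have ha2 := PySem.List.min?_isMin hA
      have hb1 := PySem.List.min?_mem hB
      have hb2 := PySem.List.min?_isMin hB
      have ha1 := PySem.List.min?_mem hA
      obtain ⟨yb, hyb, hyb2⟩ := List.mem_map.1 hb1
      obtain ⟨ya, hya, hya2⟩ := List.mem_map.1 ha1
      have h1 : a ≤ part1_alt data := by
        rw [← hyb2, hperm yb]
        have hybd : yb ∈ data := (PySem.List.mem_sorted data (fun x => x) false yb).1 hyb
        exact ha2 _ (List.mem_map_of_mem ((PySem.Set.mem_ofList data yb).2 hybd))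
      have h2 : part1_alt data ≤ a := by
        rw [← hya2, ← hperm ya]
        have hyad : ya ∈ PySem.List.sorted data (fun x => x) false :=
          (PySem.List.mem_sorted data (fun x => x) false ya).2 ((PySem.Set.mem_ofList data ya).1 hya)
        exact hb2 _ (List.mem_map_of_mem hyad)
      omega
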